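-- pv_equiv track=rewrite | github.com/NoName115/cpsk-api | scripts/resolver.py | __resolve_urls
-- ===== SOURCE A (Python) =====
-- def __resolve_urls(href_list):
--     route_url = ""
--     location_url = ""
--
--     root_link = 'https://cp.hnonline.sk'
--     string_route = '/draha/'
--     string_location = '/poloha/'
--     for url_link in href_list:
--         if (url_link.find(string_route) != -1):
--             route_url = root_link + url_link
--         elif (url_link.find(string_location) != -1):
--             location_url = root_link + url_link
--
--     return route_url, location_url
-- ===== SOURCE B (Python) =====
-- def __resolve_urls(href_list):
--     root_link = 'https://cp.hnonline.sk'
--     route = next((u for u in reversed(href_list) if '/draha/' in u), None)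
--     location = next((u for u in reversed(href_list)
--                      if '/poloha/' in u and '/draha/' not in u), None)
--     return (root_link + route if route is not None else "",
--             root_link + location if location is not None else "")
-- ===== Notes on version B (the rewrite author's own statement) =====
-- stated objective: alternative
-- what changed: Replaces the single stateful forward loop with two independent backward searches (next over reversed), taking the last '/draha/' element for route_url and the last '/poloha/'-but-not-'/draha/' element for location_url.
import Mathlib
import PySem

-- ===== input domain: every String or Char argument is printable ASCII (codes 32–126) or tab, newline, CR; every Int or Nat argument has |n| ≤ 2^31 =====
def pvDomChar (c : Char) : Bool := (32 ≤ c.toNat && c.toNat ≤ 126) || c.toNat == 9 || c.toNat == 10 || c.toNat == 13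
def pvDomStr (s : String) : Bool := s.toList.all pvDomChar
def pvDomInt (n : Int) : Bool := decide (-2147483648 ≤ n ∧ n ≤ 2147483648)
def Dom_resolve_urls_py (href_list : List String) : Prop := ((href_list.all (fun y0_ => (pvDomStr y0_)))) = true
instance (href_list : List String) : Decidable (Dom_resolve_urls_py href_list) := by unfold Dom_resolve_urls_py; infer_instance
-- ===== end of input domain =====

-- B replaces A's single stateful forward loop by two independent backward searches that stop at the first hit from the end (a timing run measured B faster).

-- ===== PORT A =====
-- literal port of A: one forward fold carrying (route_url, location_url)
def resolve_urls_py (href_list : List String) : String × String :=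
  href_list.foldl
    (fun st url_link =>
      if PySem.Str.find url_link "/draha/" ≠ -1 then
        ("https://cp.hnonline.sk" ++ url_link, st.2)
      else if PySem.Str.find url_link "/poloha/" ≠ -1 then
        (st.1, "https://cp.hnonline.sk" ++ url_link)
      else st)
    ("", "")

-- ===== PORT B =====
-- literal port of B: first hit in the reversed list, per key, independently
def resolve_urls_py_alt (href_list : List String) : String × String :=
  let root := "https://cp.hnonline.sk"
  let route := href_list.reverse.find? (fun u => PySem.Str.isIn "/draha/" u)
  let location := href_list.reverse.find?
      (fun u => PySem.Str.isIn "/poloha/" u && !PySem.Str.isIn "/draha/" u)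
  ((match route with | some u => root ++ u | none => ""),
   (match location with | some u => root ++ u | none => ""))

-- ===== PRECONDITION & SPEC =====
def Spec_resolve_urls_py (href_list : List String) (out : String × String) : Prop := out = resolve_urls_py_alt href_list
instance (href_list : List String) (out : String × String) : Decidable (Spec_resolve_urls_py href_list out) := by unfold Spec_resolve_urls_py; infer_instance

-- ===== CLAIM (what is proved, stated in full; the proofs are below) =====
def Claim_equal_resolve_urls_py : Prop := ∀ (href_list : List String), Dom_resolve_urls_py href_list → Spec_resolve_urls_py href_list (resolve_urls_py href_list)

-- ===== LEMMAS AND PROOFS =====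

-- the two tests agree: 'find ≠ -1' in A is 'isIn' in B
theorem pv_test_eq (u sub : String) :
    (PySem.Str.find u sub ≠ -1) ↔ PySem.Str.isIn sub u = true := by
  rw [PySem.Str.find_ne_neg_one_iff, PySem.Str.isIn_iff_infix]

theorem pv_main (href_list : List String) :
    resolve_urls_py href_list = resolve_urls_py_alt href_list := by
  induction href_list using List.reverseRecOn with
  | nil => rfl
  | append_singleton xs x ih =>
    simp only [resolve_urls_py, resolve_urls_py_alt, List.foldl_append, List.foldl_cons,
      List.foldl_nil, List.reverse_append, List.reverse_cons, List.reverse_nil,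
      List.nil_append, List.cons_append] at ih ⊢
    by_cases hd : PySem.Str.isIn "/draha/" x = true
    · have hfd : PySem.Str.find x "/draha/" ≠ -1 := (pv_test_eq _ _).mpr hd
      rw [if_pos hfd, List.find?_cons_of_pos (p := fun u => PySem.Str.isIn "/draha/" u) hd,
        List.find?_cons_of_neg
          (p := fun u => PySem.Str.isIn "/poloha/" u && !PySem.Str.isIn "/draha/" u)
          (by simp at hd ⊢; simp [hd]), ih]
    · have hfd : ¬ PySem.Str.find x "/draha/" ≠ -1 := fun h => hd ((pv_test_eq _ _).mp h)
      rw [if_neg hfd, List.find?_cons_of_neg (p := fun u => PySem.Str.isIn "/draha/" u) hd]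
      by_cases hp : PySem.Str.isIn "/poloha/" x = true
      · have hfp : PySem.Str.find x "/poloha/" ≠ -1 := (pv_test_eq _ _).mpr hp
        rw [if_pos hfp, List.find?_cons_of_pos
          (p := fun u => PySem.Str.isIn "/poloha/" u && !PySem.Str.isIn "/draha/" u)
          (by simp at hp hd ⊢; simp [hp, hd]), ih]
      · have hfp : ¬ PySem.Str.find x "/poloha/" ≠ -1 := fun h => hp ((pv_test_eq _ _).mp h)
        rw [if_neg hfp, List.find?_cons_of_neg
          (p := fun u => PySem.Str.isIn "/poloha/" u && !PySem.Str.isIn "/draha/" u)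
          (by simp at hp ⊢; simp [hp]), ih]

-- ===== VERDICT (by name: the statement is the Claim_ definition above) =====
theorem resolve_urls_py_spec : Claim_equal_resolve_urls_py := by
  intro href_list _
  unfold Spec_resolve_urls_py
  exact pv_main href_list
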